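-- pv_equiv track=rewrite | github.com/andjelao/Domaci6 | str12_zad03.py | bezglasni_palindrom
-- ===== SOURCE A (Python) =====
-- def bezglasni_palindrom(palindrom):
--     """
--     ulazni parametar: string koji unosi korisnik
--     u rijeci uzmemo prvo suglasnik i zamijenimo ga sa poslednjim suglasnikom, drugi suglasnik sa pretposlednjim...
--     returns da li nakon tih operacija dobijemo istu rijec
--     """
--     lista1 = []
--     lista2 = []
--     for a in palindrom:
--         lista1.append(a)
--         lista2.append(a)
--     x = 0
--     y = len(lista2) - 1
--     while x <= y:
--         if lista2[x] not in ("a", "e", "i", "o", "u"):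
--             prvi_suglasnik = lista2[x]
--             if lista2[y] not in ("a", "e", "i", "o", "u"):
--                 drugi_suglasnik = lista2[y]
--                 lista2[x] = drugi_suglasnik
--                 lista2[y] = prvi_suglasnik
--                 x = x + 1
--                 y = y - 1
--             else:
--                 y = y - 1
--         else:
--             x = x + 1
--     return lista1 == lista2
-- ===== SOURCE B (Python) =====
-- def bezglasni_palindrom(palindrom):
--     cons = [c for c in palindrom if c not in ("a", "e", "i", "o", "u")]
--     return cons == cons[::-1]
-- ===== Notes on version B (the rewrite author's own statement) =====
-- stated objective: simpler
-- what changed: A copies the string into two lists and runs an in-place two-pointer loop that swaps the k-th consonant from the front with the k-th from the back, then compares the whole lists; B builds the consonant subsequence once with a filter and checks cons == cons[::-1].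
import Mathlib
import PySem

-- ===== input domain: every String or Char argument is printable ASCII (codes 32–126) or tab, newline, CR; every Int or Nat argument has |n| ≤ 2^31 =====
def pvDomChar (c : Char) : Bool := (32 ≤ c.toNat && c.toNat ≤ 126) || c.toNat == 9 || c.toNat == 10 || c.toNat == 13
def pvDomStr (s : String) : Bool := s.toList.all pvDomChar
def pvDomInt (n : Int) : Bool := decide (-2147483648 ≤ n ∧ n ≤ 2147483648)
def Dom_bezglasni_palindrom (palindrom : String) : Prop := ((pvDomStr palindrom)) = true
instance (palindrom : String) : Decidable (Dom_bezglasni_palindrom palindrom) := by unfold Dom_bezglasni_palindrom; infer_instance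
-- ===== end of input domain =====

-- B replaces A's in-place two-pointer consonant swap-then-compare with filter-then-reverse-compare: a simpler decomposition, same result.

-- ===== PORT A =====
-- the vowel tuple ("a","e","i","o","u") of the Python source
def pvVowels : List Char := ['a', 'e', 'i', 'o', 'u']

-- the while loop of A; whenever x ≤ y both indices are in range (x starts at 0 and
-- only increases, y < length), so the .getD ' ' defaults and .toNat are never exercised
-- out of range and the port is exact
def bpLoop (l : List Char) (x y : Int) : List Char :=
  if _h : x ≤ y then
    if pvVowels.contains ((PySem.List.pyGet? l x).getD ' ') = false then
      if pvVowels.contains ((PySem.List.pyGet? l y).getD ' ') = false then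
        bpLoop ((l.set x.toNat ((PySem.List.pyGet? l y).getD ' ')).set y.toNat
                 ((PySem.List.pyGet? l x).getD ' ')) (x + 1) (y - 1)
      else
        bpLoop l x (y - 1)
    else
      bpLoop l (x + 1) y
  else l
termination_by (y + 1 - x).toNat
decreasing_by all_goals omega

def bezglasni_palindrom (palindrom : String) : Bool :=
  let lista1 := palindrom.toList.foldl (fun acc a => acc ++ [a]) []
  let lista2 := palindrom.toList.foldl (fun acc a => acc ++ [a]) []
  lista1 == bpLoop lista2 0 ((lista2.length : Int) - 1)

-- ===== PORT B =====
def bezglasni_palindrom_alt (palindrom : String) : Bool :=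
  let cons := palindrom.toList.filter (fun c => !(pvVowels.contains c))
  cons == cons.reverse

-- ===== PRECONDITION & SPEC =====
def Spec_bezglasni_palindrom (palindrom : String) (out : Bool) : Prop := out = bezglasni_palindrom_alt palindrom
instance (palindrom : String) (out : Bool) : Decidable (Spec_bezglasni_palindrom palindrom out) := by unfold Spec_bezglasni_palindrom; infer_instance

-- ===== CLAIM (what is proved, stated in full; the proofs are below) =====
def Claim_equal_bezglasni_palindrom : Prop := ∀ (palindrom : String), Dom_bezglasni_palindrom palindrom → Spec_bezglasni_palindrom palindrom (bezglasni_palindrom palindrom)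

-- ===== LEMMAS AND PROOFS =====

-- structural mirror of the two-pointer loop acting on the still-unvisited middle segment
def bpSpec : List Char → List Char
  | [] => []
  | [c] => [c]
  | a :: b :: t =>
    if pvVowels.contains a then a :: bpSpec (b :: t)
    else if pvVowels.contains ((b :: t).getLastD ' ') then
      bpSpec (a :: (b :: t).dropLast) ++ [(b :: t).getLastD ' ']
    else
      (b :: t).getLastD ' ' :: bpSpec ((b :: t).dropLast) ++ [a]
termination_by l => l.length
decreasing_by all_goals simp

lemma bp_get_mid (p s : List Char) (c : Char) :
    PySem.List.pyGet? (p ++ c :: s) ((p.length : Int)) = some c := by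
  simp

lemma bp_set_mid (p s : List Char) (c d : Char) :
    (p ++ c :: s).set p.length d = p ++ d :: s := by
  induction p with
  | nil => simp
  | cons h t ih => simp [ih]

-- the loop reverses the consonants of the middle segment in place: bpLoop on p ++ m ++ s
-- with pointers framing m returns p ++ bpSpec m ++ s
lemma bp_bridge : ∀ (n : Nat) (m p s : List Char), m.length = n →
    bpLoop (p ++ m ++ s) (p.length : Int) ((p.length : Int) + m.length - 1)
      = p ++ bpSpec m ++ s := by
  intro n
  induction n using Nat.strong_induction_on with
  | _ n ih =>
    intro m p s hm
    match m with
    | [] =>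
      rw [bpLoop, dif_neg (by simp)]
      simp [bpSpec]
    | [c] =>
      have hx : PySem.List.pyGet? (p ++ [c] ++ s) ((p.length : Int)) = some c := by
        rw [show p ++ [c] ++ s = p ++ c :: s by simp]; exact bp_get_mid p s c
      have hy : (p.length : Int) + ([c] : List Char).length - 1 = (p.length : Int) := by
        simp
      rw [hy, bpLoop, dif_pos le_rfl, hx]
      by_cases hc : c ∈ pvVowels
      · rw [if_neg (by simp [hc])]
        rw [bpLoop, dif_neg (by omega)]
        simp [bpSpec]
      · rw [if_pos (by simp [hc]), if_pos (by simp [hc])]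
        simp only [Option.getD_some, Int.toNat_natCast]
        rw [show p ++ [c] ++ s = p ++ c :: s by simp, bp_set_mid, bp_set_mid]
        rw [bpLoop, dif_neg (by omega)]
        simp [bpSpec]
    | a :: b :: t =>
      obtain ⟨mid, bl, hr⟩ : ∃ mid bl, b :: t = mid ++ [bl] :=
        ⟨(b::t).dropLast, (b::t).getLast (by simp),
          (List.dropLast_append_getLast (by simp)).symm⟩
      have hlen : mid.length = t.length := by
        have := congrArg List.length hr; simp at this; omega
      have hx : PySem.List.pyGet? (p ++ (a :: b :: t) ++ s) ((p.length : Int)) = some a := by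
        rw [show p ++ (a :: b :: t) ++ s = p ++ a :: (b :: t ++ s) by simp]
        exact bp_get_mid p (b :: t ++ s) a
      have hY : (p.length : Int) + ((a :: b :: t : List Char)).length - 1
          = (((p ++ a :: mid).length : Nat) : Int) := by
        simp [hlen]; omega
      have hL : p ++ (a :: b :: t) ++ s = (p ++ a :: mid) ++ bl :: s := by
        simp [hr]
      have hy : PySem.List.pyGet? (p ++ (a :: b :: t) ++ s) ((p.length : Int) + ((a :: b :: t : List Char)).length - 1) = some bl := by
        rw [hY, hL]; exact bp_get_mid (p ++ a :: mid) s bl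
      rw [bpLoop, dif_pos (by simp; omega), hx, hy]
      simp only [Option.getD_some]
      by_cases ha : a ∈ pvVowels
      · rw [if_neg (by simp [ha])]
        have e1 : (p.length : Int) + 1 = (((p ++ [a]).length : Nat) : Int) := by
          simp
        have e2 : (p.length : Int) + ((a :: b :: t : List Char)).length - 1
            = (((p ++ [a]).length : Nat) : Int) + ((b :: t : List Char)).length - 1 := by
          simp; omega
        rw [show p ++ (a :: b :: t) ++ s = (p ++ [a]) ++ (b :: t) ++ s by simp,
            e1, e2, ih (b :: t).length (by simp at hm ⊢; omega) (b :: t) (p ++ [a]) s rfl]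
        rw [show bpSpec (a :: b :: t) = a :: bpSpec (b :: t) by rw [bpSpec]; simp [ha]]
        simp
      · by_cases hbl : bl ∈ pvVowels
        · rw [if_pos (by simp [ha]), if_neg (by simp [hbl])]
          have e2 : (p.length : Int) + ((a :: b :: t : List Char)).length - 1 - 1
              = (p.length : Int) + ((a :: mid : List Char)).length - 1 := by
            simp [hlen]; omega
          rw [e2, show p ++ (a :: b :: t) ++ s = p ++ (a :: mid) ++ (bl :: s) by simp [hr],
              ih (a :: mid).length (by simp at hm ⊢; omega) (a :: mid) p (bl :: s) rfl]
          rw [show bpSpec (a :: b :: t) = bpSpec (a :: mid) ++ [bl] by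
            rw [bpSpec]; simp [ha, hbl, hr]]
          simp
        · rw [if_pos (by simp [ha]), if_pos (by simp [hbl])]
          simp only [Int.toNat_natCast]
          have hset1 : (p ++ (a :: b :: t) ++ s).set p.length bl
              = p ++ bl :: (mid ++ bl :: s) := by
            rw [show p ++ (a :: b :: t) ++ s = p ++ a :: (mid ++ bl :: s) by simp [hr]]
            exact bp_set_mid p (mid ++ bl :: s) a bl
          have hset2 : (p ++ bl :: (mid ++ bl :: s)).set ((p.length : Int) + ((a :: b :: t : List Char)).length - 1).toNat a
              = (p ++ bl :: mid) ++ a :: s := by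
            rw [show p ++ bl :: (mid ++ bl :: s) = (p ++ bl :: mid) ++ bl :: s by simp]
            rw [show ((p.length : Int) + ((a :: b :: t : List Char)).length - 1).toNat
                = (p ++ bl :: mid).length by simp [hlen]; omega]
            exact bp_set_mid (p ++ bl :: mid) s bl a
          rw [hset1, hset2]
          have e1 : (p.length : Int) + 1 = (((p ++ [bl]).length : Nat) : Int) := by simp
          have e2 : (p.length : Int) + ((a :: b :: t : List Char)).length - 1 - 1
              = (((p ++ [bl]).length : Nat) : Int) + (mid.length : Int) - 1 := by
            simp [hlen]; omega
          rw [show (p ++ bl :: mid) ++ a :: s = (p ++ [bl]) ++ mid ++ (a :: s) by simp,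
              e1, e2, ih mid.length (by simp at hm ⊢; omega) mid (p ++ [bl]) (a :: s) rfl]
          rw [show bpSpec (a :: b :: t) = bl :: bpSpec mid ++ [a] by
            rw [bpSpec]; simp [ha, hbl, hr]]
          simp

-- a list is fixed by the in-place consonant reversal iff its consonant subsequence is a palindrome
lemma bp_pal : ∀ (n : Nat) (m : List Char), m.length = n →
    (m = bpSpec m ↔ m.filter (fun c => !(pvVowels.contains c))
      = (m.filter (fun c => !(pvVowels.contains c))).reverse) := by
  intro n
  induction n using Nat.strong_induction_on with
  | _ n ih =>
    intro m hm
    match m with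
    | [] => simp [bpSpec]
    | [c] =>
      by_cases hc : c ∈ pvVowels <;> simp [bpSpec, hc]
    | a :: b :: t =>
      obtain ⟨mid, bl, hr⟩ : ∃ mid bl, b :: t = mid ++ [bl] :=
        ⟨(b::t).dropLast, (b::t).getLast (by simp),
          (List.dropLast_append_getLast (by simp)).symm⟩
      have hlen : mid.length = t.length := by
        have := congrArg List.length hr; simp at this; omega
      by_cases ha : a ∈ pvVowels
      · have ihr := ih (b::t).length (by simp at hm ⊢; omega) (b::t) rfl
        rw [show bpSpec (a :: b :: t) = a :: bpSpec (b :: t) by rw [bpSpec]; simp [ha]]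
        simp only [List.cons.injEq, true_and]
        rw [ihr]
        simp [List.filter, ha]
      · by_cases hbl : bl ∈ pvVowels
        · have ihr := ih (a :: mid).length (by simp at hm ⊢; omega) (a :: mid) rfl
          rw [show bpSpec (a :: b :: t) = bpSpec (a :: mid) ++ [bl] by
            rw [bpSpec]; simp [ha, hbl, hr]]
          rw [show a :: b :: t = (a :: mid) ++ [bl] by simp [hr]]
          rw [List.append_left_inj]
          rw [ihr]
          simp [List.filter_append, ha, hbl]
        · have ihr := ih mid.length (by simp at hm ⊢; omega) mid rfl
          rw [show bpSpec (a :: b :: t) = bl :: bpSpec mid ++ [a] by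
            rw [bpSpec]; simp [ha, hbl, hr]]
          rw [show a :: b :: t = a :: mid ++ [bl] by simp [hr]]
          have hfil : (a :: mid ++ [bl]).filter (fun c => !(pvVowels.contains c))
              = a :: (mid.filter (fun c => !(pvVowels.contains c))) ++ [bl] := by
            simp [List.filter_append, ha, hbl]
          rw [hfil]
          simp only [List.reverse_append, List.reverse_cons, List.reverse_nil,
            List.nil_append, List.cons_append, List.cons.injEq]
          constructor
          · rintro ⟨rfl, h2⟩
            rw [List.append_left_inj (t := [a])] at h2
            exact ⟨rfl, by rw [List.append_left_inj]; exact ihr.mp h2⟩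
          · rintro ⟨rfl, h2⟩
            rw [List.append_left_inj (t := [a])] at h2
            exact ⟨rfl, by rw [List.append_left_inj]; exact ihr.mpr h2⟩

lemma bp_foldl_app (l acc : List Char) :
    l.foldl (fun acc a => acc ++ [a]) acc = acc ++ l := by
  induction l generalizing acc with
  | nil => simp
  | cons h t ih => simp [List.foldl, ih]

-- ===== VERDICT (by name: the statement is the Claim_ definition above) =====
theorem bezglasni_palindrom_spec : Claim_equal_bezglasni_palindrom := by
  intro s _
  unfold Spec_bezglasni_palindrom bezglasni_palindrom bezglasni_palindrom_alt
  simp only [bp_foldl_app, List.nil_append]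
  have hb := bp_bridge s.toList.length s.toList [] [] rfl
  simp only [List.nil_append, List.append_nil, List.length_nil, Nat.cast_zero, zero_add] at hb
  rw [hb]
  apply Bool.eq_iff_iff.mpr
  simp only [beq_iff_eq]
  exact bp_pal s.toList.length s.toList rfl
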